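-- pv_equiv track=rewrite | github.com/krishshenvi/Mini-sql-engine | assg1.py | reading_meta
-- ===== SOURCE A (Python) =====
-- def reading_meta(lines):
--
--     jj={}
--     pp=0
--     kk=lines
--     for i in kk:
--         i=i.rstrip('\r\n')
--         if(pp==0):
--             table_name=i
--             table_name = table_name.lower()
--             pp=1
--             jj[table_name]=[]
--             continue
--         elif('<end_table>' in i):
--             pp=0
--         elif(pp):
--             jj[table_name].append(i.lower())
--     return jj
-- ===== SOURCE B (Python) =====
-- def reading_meta(lines):
--     jj = {}
--     i = 0
--     n = len(lines)
--     while i < n: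
--         name = lines[i].rstrip('\r\n').lower()
--         jj[name] = []
--         i += 1
--         while i < n and '<end_table>' not in lines[i].rstrip('\r\n'):
--             jj[name].append(lines[i].rstrip('\r\n').lower())
--             i += 1
--         if i < n:
--             i += 1
--     return jj
-- ===== Notes on version B (the rewrite author's own statement) =====
-- stated objective: alternative
-- what changed: Replaced A's flag-driven single fold (pp state machine over all lines) with an explicit index-based nested loop: the outer loop takes a table-name line, the inner loop collects its column lines until the '<end_table>' terminator, making the table grouping explicit.
import Mathlib
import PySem

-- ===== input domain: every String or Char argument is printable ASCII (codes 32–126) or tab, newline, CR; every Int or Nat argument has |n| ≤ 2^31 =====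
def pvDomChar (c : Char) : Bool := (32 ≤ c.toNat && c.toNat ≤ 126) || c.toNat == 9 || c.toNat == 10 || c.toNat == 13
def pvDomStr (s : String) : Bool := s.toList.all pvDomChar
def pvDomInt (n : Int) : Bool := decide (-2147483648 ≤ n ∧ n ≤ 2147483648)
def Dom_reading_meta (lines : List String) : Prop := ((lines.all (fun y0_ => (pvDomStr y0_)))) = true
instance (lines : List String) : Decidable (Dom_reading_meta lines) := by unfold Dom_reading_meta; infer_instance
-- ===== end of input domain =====

-- ===== PORT A =====
-- B replaces A's flag-driven fold with an explicit nested loop over groups; same O(n) cost.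

-- s.rstrip('\r\n'): drop trailing '\r'/'\n' characters (hand port, exact: reversed dropWhile)
def pvRstripCRLF (s : String) : String :=
  String.ofList ((s.toList.reverse.dropWhile (fun c => c == '\r' || c == '\n')).reverse)

-- literal port of A: one fold carrying (jj, pp, table_name)
def readingMetaStepA (st : PySem.Dict String (List String) × Int × String) (l : String) :
    PySem.Dict String (List String) × Int × String :=
  let jj := st.1
  let pp := st.2.1
  let table_name := st.2.2
  let i := pvRstripCRLF l
  if pp = 0 then
    let tn := PySem.Str.lower i
    (jj.insert tn [], 1, tn)
  else if PySem.Str.isIn "<end_table>" i then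
    (jj, 0, table_name)
  else if pp ≠ 0 then
    (jj.modify table_name [] (fun v => v ++ [PySem.Str.lower i]), pp, table_name)
  else
    (jj, pp, table_name)

def reading_meta (lines : List String) : List (String × List String) :=
  (lines.foldl readingMetaStepA (PySem.Dict.empty, 0, "")).1.items

-- ===== PORT B =====
-- outer loop: current line is a table name; inner loop: collect lines until '<end_table>'
mutual
def readingMetaOuter (jj : PySem.Dict String (List String)) :
    List String → PySem.Dict String (List String)
  | [] => jj
  | l :: rest =>
      let name := PySem.Str.lower (pvRstripCRLF l)
      readingMetaInner (jj.insert name []) name rest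
def readingMetaInner (jj : PySem.Dict String (List String)) (name : String) :
    List String → PySem.Dict String (List String)
  | [] => jj
  | l :: rest =>
      let i := pvRstripCRLF l
      if PySem.Str.isIn "<end_table>" i then
        readingMetaOuter jj rest
      else
        readingMetaInner (jj.modify name [] (fun v => v ++ [PySem.Str.lower i])) name rest
end

def reading_meta_alt (lines : List String) : List (String × List String) :=
  (readingMetaOuter PySem.Dict.empty lines).items

-- ===== PRECONDITION & SPEC =====
def Spec_reading_meta (lines : List String) (out : List (String × List String)) : Prop := out = reading_meta_alt lines
instance (lines : List String) (out : List (String × List String)) : Decidable (Spec_reading_meta lines out) := by unfold Spec_reading_meta; infer_instance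

-- ===== CLAIM (what is proved, stated in full; the proofs are below) =====
def Claim_equal_reading_meta : Prop := ∀ (lines : List String), Dom_reading_meta lines → Spec_reading_meta lines (reading_meta lines)

-- ===== LEMMAS AND PROOFS =====

-- loop invariant: A's fold from state pp ∈ {0,1} equals B's outer/inner loop on the rest
theorem readingMeta_loop_eq (rest : List String) :
    ∀ (jj : PySem.Dict String (List String)) (pp : Int) (name : String),
      pp = 0 ∨ pp = 1 →
      (List.foldl readingMetaStepA (jj, pp, name) rest).1 =
        (if pp = 0 then readingMetaOuter jj rest else readingMetaInner jj name rest) := by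
  induction rest with
  | nil => intro jj pp name _; rcases ‹pp = 0 ∨ pp = 1› with h | h <;> simp [h, readingMetaOuter, readingMetaInner]
  | cons l rest ih =>
    intro jj pp name hpp
    rcases hpp with h | h <;> subst h
    · simp only [List.foldl_cons, readingMetaStepA, readingMetaOuter]
      exact ih _ 1 _ (Or.inr rfl)
    · by_cases he : PySem.Str.isIn "<end_table>" (pvRstripCRLF l) = true
      · have hstep : readingMetaStepA (jj, 1, name) l = (jj, 0, name) := by
          unfold readingMetaStepA
          rw [if_neg (by norm_num : ¬ (1:Int) = 0), if_pos he]
        have he' : PySem.Chars.isIn ['<','e','n','d','_','t','a','b','l','e','>'] (pvRstripCRLF l).toList = true := by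
          simpa using he
        rw [List.foldl_cons, hstep, ih _ 0 _ (Or.inl rfl)]
        simp [readingMetaInner, he']
      · have hstep : readingMetaStepA (jj, 1, name) l =
            (jj.modify name [] (fun v => v ++ [PySem.Str.lower (pvRstripCRLF l)]), 1, name) := by
          unfold readingMetaStepA
          rw [if_neg (by norm_num : ¬ (1:Int) = 0), if_neg he,
            if_pos (by norm_num : (1:Int) ≠ 0)]
        have he' : PySem.Chars.isIn ['<','e','n','d','_','t','a','b','l','e','>'] (pvRstripCRLF l).toList = false := by
          simpa using he
        rw [List.foldl_cons, hstep, ih _ 1 _ (Or.inr rfl)]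
        simp [readingMetaInner, he']

-- ===== VERDICT (by name: the statement is the Claim_ definition above) =====
theorem reading_meta_spec : Claim_equal_reading_meta := by
  intro lines _
  unfold Spec_reading_meta reading_meta reading_meta_alt
  rw [readingMeta_loop_eq lines _ 0 "" (Or.inl rfl), if_pos rfl]
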